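-- pv_equiv track=rewrite | github.com/somtooriaku/Leetcode-prep | 2. sliding_window.py | LongestStrWithSameLettersAfterReplacement
-- ===== SOURCE A (Python) =====
-- def LongestStrWithSameLettersAfterReplacement(str, k):
--     """
--     HARD ***
--     Given a string with lowercase letters only, if you are
--     allowed to replace no more than k letters with any letter,
--     find the length of the longest substring having the same letters
--     after replacement
--     """
--     maxLength = 0
--     MaxLetRepeat = 0
--     FreqMap = {}
--     lastIndex = 0
--
--     for index in range(len(str)):
--         currElem = str[index]
--         if currElem not in FreqMap:
--             FreqMap[currElem] = 0
--         FreqMap[currElem] += 1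
--         # maxLetRepeat is currently the maximum repeating character
--         MaxLetRepeat = max(MaxLetRepeat, FreqMap[currElem])
--
--         # now, in the window, we have a max repeating letter and some other letters. We would make
--         # sure that the window = max repeating letter + k pr shrink it
--         if ( index - lastIndex + 1 - MaxLetRepeat) > k:
--             lastChar = str[lastIndex]
--             FreqMap[lastChar] -= 1
--             lastIndex += 1
--         maxLength = max(maxLength, index - lastIndex + 1)
--     return maxLength
-- ===== SOURCE B (Python) =====
-- def LongestStrWithSameLettersAfterReplacement(str, k):
--     """Exhaustive search: the answer is the length of the longest substring
--     whose length minus its most frequent letter's count is at most k."""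
--     n = len(str)
--     best = 0
--     for i in range(n):
--         for j in range(i, n):
--             sub = str[i:j + 1]
--             if (j + 1 - i) - max(sub.count(c) for c in set(sub)) <= k:
--                 best = max(best, j + 1 - i)
--     return best
-- ===== Notes on version B (the rewrite author's own statement) =====
-- stated objective: alternative
-- what changed: Replaces the one-pass sliding window (frequency dict, running max-repeat count, lazily advancing left bound) by a direct exhaustive maximization over all substrings, testing each substring's length minus its most frequent letter's count against k.
import Mathlib
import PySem

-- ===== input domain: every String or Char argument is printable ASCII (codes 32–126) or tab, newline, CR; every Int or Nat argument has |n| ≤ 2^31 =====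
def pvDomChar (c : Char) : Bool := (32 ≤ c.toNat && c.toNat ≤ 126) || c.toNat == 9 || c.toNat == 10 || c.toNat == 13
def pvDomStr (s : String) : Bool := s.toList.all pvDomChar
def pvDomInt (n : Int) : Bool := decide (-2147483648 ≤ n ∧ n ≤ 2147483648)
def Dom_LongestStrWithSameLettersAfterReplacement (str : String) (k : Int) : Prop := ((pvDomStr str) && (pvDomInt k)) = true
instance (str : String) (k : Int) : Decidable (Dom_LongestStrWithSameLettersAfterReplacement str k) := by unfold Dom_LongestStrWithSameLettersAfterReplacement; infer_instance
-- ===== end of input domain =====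

-- B replaces A's one-pass sliding window by an exhaustive maximization over all
-- substrings (alternative decomposition, not faster); proved to return the same value.


-- ===== PORT A =====
-- one iteration of A's for-loop; state = (maxLength, MaxLetRepeat, FreqMap, lastIndex)
def pvStepA (cs : List Char) (k : Int)
    (st : Int × Int × PySem.Dict Char Int × Int) (index : Int) :
    Int × Int × PySem.Dict Char Int × Int :=
  let maxLength := st.1
  let M0 := st.2.1
  let Freq0 := st.2.2.1
  let last0 := st.2.2.2
  -- index ∈ [0, len) along the loop, so pyGetD with a dummy default is exactly str[index]
  let currElem := PySem.List.pyGetD cs index ' '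
  let Freq1 := if Freq0.contains currElem then Freq0 else Freq0.insert currElem 0
  let f := Freq1.getD currElem 0 + 1
  let Freq2 := Freq1.insert currElem f
  let M := max M0 f
  -- lastIndex ∈ [0, index] always, so pyGetD with a dummy default is exactly str[lastIndex]
  let FL : PySem.Dict Char Int × Int :=
    if index - last0 + 1 - M > k then
      let lastChar := PySem.List.pyGetD cs last0 ' '
      (Freq2.insert lastChar (Freq2.getD lastChar 0 - 1), last0 + 1)
    else (Freq2, last0)
  (max maxLength (index - FL.2 + 1), M, FL.1, FL.2)

def LongestStrWithSameLettersAfterReplacement (str : String) (k : Int) : Int :=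
  ((PySem.List.pyRange 0 (str.toList.length) 1).foldl (pvStepA str.toList k)
    (0, 0, PySem.Dict.empty, 0)).1

-- ===== PORT B =====
-- max(sub.count(c) for c in set(sub)); sub is always nonempty where called, so the
-- getD 0 default is never the result (Python's max never sees an empty generator)
def pvMaxCount (sub : List Char) : Int :=
  (PySem.List.max? ((PySem.Set.ofList sub).map (fun c => (sub.count c : Int))) (fun x => x)).getD 0

def LongestStrWithSameLettersAfterReplacement_alt (str : String) (k : Int) : Int :=
  let cs := str.toList
  let n : Int := cs.length
  (PySem.List.pyRange 0 n 1).foldl (fun best i =>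
    (PySem.List.pyRange i n 1).foldl (fun best j =>
      let sub := PySem.List.slice cs (some i) (some (j + 1))
      if (j + 1 - i) - pvMaxCount sub ≤ k then max best (j + 1 - i) else best) best) 0

-- ===== PRECONDITION & SPEC =====
def Spec_LongestStrWithSameLettersAfterReplacement (str : String) (k : Int) (out : Int) : Prop := out = LongestStrWithSameLettersAfterReplacement_alt str k
instance (str : String) (k : Int) (out : Int) : Decidable (Spec_LongestStrWithSameLettersAfterReplacement str k out) := by unfold Spec_LongestStrWithSameLettersAfterReplacement; infer_instance

-- ===== CLAIM (what is proved, stated in full; the proofs are below) =====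
def Claim_equal_LongestStrWithSameLettersAfterReplacement : Prop := ∀ (str : String) (k : Int), Dom_LongestStrWithSameLettersAfterReplacement str k → Spec_LongestStrWithSameLettersAfterReplacement str k (LongestStrWithSameLettersAfterReplacement str k)

-- ===== LEMMAS AND PROOFS =====

-- window s[l:r] as a list
def pvWin (cs : List Char) (l r : Nat) : List Char := (cs.drop l).take (r - l)

-- A's loop state after processing the first m indices
def pvFoldA (cs : List Char) (k : Int) (m : Nat) : Int × Int × PySem.Dict Char Int × Int :=
  (PySem.List.pyRange 0 (m : Int) 1).foldl (pvStepA cs k) (0, 0, PySem.Dict.empty, 0)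

-- invariant of A's loop: maxLength is the current window size, FreqMap holds the
-- window's letter counts, MaxLetRepeat dominates them and was achieved by a window of
-- size at most (current size + 1) starting at or before lastIndex, and a window of the
-- current size needing at most k replacements exists (unless the window is empty)
def pvInv (cs : List Char) (k : Int) (m : Nat) (st : Int × Int × PySem.Dict Char Int × Int) : Prop :=
  ∃ last : Nat, st.2.2.2 = (last : Int) ∧ last ≤ m ∧
    st.1 = ((m - last : Nat) : Int) ∧
    (∀ c, st.2.2.1.getD c 0 = ((pvWin cs last m).count c : Int)) ∧
    (∀ c, ((pvWin cs last m).count c : Int) ≤ st.2.1) ∧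
    (st.2.1 = 0 ∨ ∃ p t c, p ≤ last ∧ t < m ∧ t + 1 - p ≤ (m - last) + 1 ∧
        ((pvWin cs p (t + 1)).count c : Int) = st.2.1) ∧
    (m = last ∨ ∃ p c, p + (m - last) ≤ m ∧
        ((m - last : Nat) : Int) - ((pvWin cs p (p + (m - last))).count c : Int) ≤ k)

lemma pvFoldA_zero (cs : List Char) (k : Int) :
    pvFoldA cs k 0 = (0, 0, PySem.Dict.empty, 0) := by
  simp [pvFoldA, PySem.List.pyRange_one_eq_nil (le_refl (0 : Int))]

lemma pvFoldA_succ (cs : List Char) (k : Int) (m : Nat) :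
    pvFoldA cs k (m + 1) = pvStepA cs k (pvFoldA cs k m) (m : Int) := by
  unfold pvFoldA
  have h1 : ((m + 1 : Nat) : Int) = (m : Int) + 1 := by push_cast; ring
  rw [h1, PySem.List.pyRange_one_succ_right (by positivity), List.foldl_append]
  simp

lemma pvA_eq (str : String) (k : Int) :
    LongestStrWithSameLettersAfterReplacement str k = (pvFoldA str.toList k str.toList.length).1 := rfl

-- window arithmetic
lemma pvWin_self (cs : List Char) (l : Nat) : pvWin cs l l = [] := by simp [pvWin]

lemma pvWin_succ_right (cs : List Char) {l m : Nat} (h1 : l ≤ m) (h2 : m < cs.length) :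
    pvWin cs l (m + 1) = pvWin cs l m ++ [cs[m]] := by
  unfold pvWin
  have h3 : m + 1 - l = (m - l) + 1 := by omega
  rw [h3, List.take_succ]
  congr 1
  rw [List.getElem?_drop]
  have h4 : l + (m - l) = m := by omega
  rw [h4, List.getElem?_eq_getElem h2]
  rfl

lemma pvWin_cons (cs : List Char) {l m : Nat} (h1 : l ≤ m) (h2 : l < cs.length) :
    pvWin cs l (m + 1) = cs[l] :: pvWin cs (l + 1) (m + 1) := by
  unfold pvWin
  rw [List.drop_eq_getElem_cons h2]
  have h3 : m + 1 - l = (m - l) + 1 := by omega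
  have h4 : m + 1 - (l + 1) = m - l := by omega
  rw [h3, h4, List.take_succ_cons]

lemma pvWin_append (cs : List Char) (p q r : Nat) (hpq : p ≤ q) (hqr : q ≤ r) :
    pvWin cs p r = pvWin cs p q ++ pvWin cs q r := by
  unfold pvWin
  have h1 : r - p = (q - p) + (r - q) := by omega
  rw [h1, List.take_add]
  congr 2
  rw [List.drop_drop]
  congr 1
  omega

lemma pvWin_count_mono (cs : List Char) (c : Char) {p q q' : Nat} (h : q ≤ q') :
    (pvWin cs p q).count c ≤ (pvWin cs p q').count c := by
  have hsub : (pvWin cs p q).Sublist (pvWin cs p q') := by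
    unfold pvWin
    have he : ((cs.drop p).take (q - p)) = ((cs.drop p).take (q' - p)).take (q - p) := by
      rw [List.take_take]
      congr 1
      omega
    rw [he]
    exact (List.take_prefix _ _).sublist
  exact List.Sublist.count_le c hsub

lemma pvWin_length (cs : List Char) (p q : Nat) :
    (pvWin cs p q).length = min (q - p) (cs.length - p) := by
  simp [pvWin]

-- the count of the window extended by one character on the right
lemma pvCount_push (cs : List Char) {l m : Nat} (h1 : l ≤ m) (h2 : m < cs.length) (d : Char) :
    (pvWin cs l (m + 1)).count d = (pvWin cs l m).count d + (if cs[m] = d then 1 else 0) := by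
  rw [pvWin_succ_right cs h1 h2, List.count_append]
  congr 1
  simp [List.count_cons]

-- Dict facts about A's frequency-map update
lemma pvGetD_of_not_contains (F : PySem.Dict Char Int) (c : Char) (h : F.contains c = false) :
    F.getD c 0 = 0 := by
  have h2 : F.get? c = none := by
    have h3 := PySem.Dict.contains_eq_isSome_get? F c
    rw [h] at h3
    cases hg : F.get? c with
    | none => rfl
    | some v => rw [hg] at h3; simp at h3
  simp [PySem.Dict.getD, h2]

lemma pvF1_getD (F : PySem.Dict Char Int) (c d : Char) :
    (if F.contains c then F else F.insert c 0).getD d 0 = F.getD d 0 := by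
  split_ifs with h
  · rfl
  · rw [PySem.Dict.getD_insert]
    split_ifs with hdc
    · subst hdc
      rw [pvGetD_of_not_contains F d (by simpa using h)]
    · rfl

-- counts after A's frequency increment (with the inserted value already simplified by pvF1_getD)
lemma pvA1_getD (F : PySem.Dict Char Int) (c e : Char) :
    ((if F.contains c then F else F.insert c 0).insert c (F.getD c 0 + 1)).getD e 0
      = F.getD e 0 + (if c = e then 1 else 0) := by
  rw [PySem.Dict.getD_insert]
  by_cases hec : e = c
  · subst hec; simp
  · have hce : ¬ c = e := fun h => hec h.symm
    rw [if_neg hec, pvF1_getD, if_neg hce]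
    ring

-- one iteration of A's loop, shrink case, fully characterised
lemma pvStepA_shrink (cs : List Char) (k : Int) (st : Int × Int × PySem.Dict Char Int × Int)
    (m last : Nat) (hm : m < cs.length) (hlm : last < cs.length) (hL : st.2.2.2 = (last : Int))
    (hcond : (m : Int) - (last : Int) + 1 - max st.2.1 (st.2.2.1.getD cs[m] 0 + 1) > k) :
    (pvStepA cs k st (m : Int)).1 = max st.1 ((m : Int) - ((last : Int) + 1) + 1)
    ∧ (pvStepA cs k st (m : Int)).2.1 = max st.2.1 (st.2.2.1.getD cs[m] 0 + 1)
    ∧ (∀ d, (pvStepA cs k st (m : Int)).2.2.1.getD d 0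
          = st.2.2.1.getD d 0 + (if cs[m] = d then 1 else 0) - (if cs[last] = d then 1 else 0))
    ∧ (pvStepA cs k st (m : Int)).2.2.2 = (last : Int) + 1 := by
  have hcurr : PySem.List.pyGetD cs (m : Int) ' ' = cs[m] := by
    rw [PySem.List.pyGetD_natCast]; exact List.getD_eq_getElem cs ' ' hm
  have hlast' : PySem.List.pyGetD cs ((last : Nat) : Int) ' ' = cs[last] := by
    rw [PySem.List.pyGetD_natCast]; exact List.getD_eq_getElem cs ' ' hlm
  refine ⟨?_, ?_, ?_, ?_⟩
  · simp only [pvStepA, hcurr, hL, hlast', pvF1_getD]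
    rw [if_pos hcond]
  · simp only [pvStepA, hcurr, hL, hlast', pvF1_getD]
  · intro d
    simp only [pvStepA, hcurr, hL, hlast', pvF1_getD]
    rw [if_pos hcond]
    simp only []
    rw [PySem.Dict.getD_insert]
    by_cases hdl : d = cs[last]
    · subst hdl
      rw [if_pos rfl, pvA1_getD, if_pos rfl]
    · have hld : ¬ cs[last] = d := fun h => hdl h.symm
      rw [if_neg hdl, pvA1_getD, if_neg hld]
      ring
  · simp only [pvStepA, hcurr, hL, hlast', pvF1_getD]
    rw [if_pos hcond]

-- one iteration of A's loop, no-shrink case, fully characterised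
lemma pvStepA_grow (cs : List Char) (k : Int) (st : Int × Int × PySem.Dict Char Int × Int)
    (m last : Nat) (hm : m < cs.length) (hL : st.2.2.2 = (last : Int))
    (hcond : ¬ ((m : Int) - (last : Int) + 1 - max st.2.1 (st.2.2.1.getD cs[m] 0 + 1) > k)) :
    (pvStepA cs k st (m : Int)).1 = max st.1 ((m : Int) - (last : Int) + 1)
    ∧ (pvStepA cs k st (m : Int)).2.1 = max st.2.1 (st.2.2.1.getD cs[m] 0 + 1)
    ∧ (∀ d, (pvStepA cs k st (m : Int)).2.2.1.getD d 0
          = st.2.2.1.getD d 0 + (if cs[m] = d then 1 else 0))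
    ∧ (pvStepA cs k st (m : Int)).2.2.2 = (last : Int) := by
  have hcurr : PySem.List.pyGetD cs (m : Int) ' ' = cs[m] := by
    rw [PySem.List.pyGetD_natCast]; exact List.getD_eq_getElem cs ' ' hm
  refine ⟨?_, ?_, ?_, ?_⟩
  · simp only [pvStepA, hcurr, hL, pvF1_getD]
    rw [if_neg hcond]
  · simp only [pvStepA, hcurr, hL, pvF1_getD]
  · intro d
    simp only [pvStepA, hcurr, hL, pvF1_getD]
    rw [if_neg hcond]
    simp only []
    exact pvA1_getD st.2.2.1 cs[m] d
  · simp only [pvStepA, hcurr, hL, pvF1_getD]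
    rw [if_neg hcond]

-- the main preservation lemma: one iteration of A's loop keeps the invariant
lemma pvInv_step (cs : List Char) (k : Int) (m : Nat) (st : Int × Int × PySem.Dict Char Int × Int)
    (hm : m < cs.length) (h : pvInv cs k m st) :
    pvInv cs k (m + 1) (pvStepA cs k st (m : Int)) := by
  obtain ⟨last, hL, hLm, hmax, hF, hdom, hM2, hW⟩ := h
  have hfval : st.2.2.1.getD cs[m] 0 + 1 = ((pvWin cs last (m + 1)).count cs[m] : Int) := by
    rw [hF cs[m], pvCount_push cs hLm hm cs[m], if_pos rfl]
    push_cast; ring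
  have hfpos : (1 : Int) ≤ st.2.2.1.getD cs[m] 0 + 1 := by
    rw [hF cs[m]]
    have : (0 : Int) ≤ ((pvWin cs last m).count cs[m] : Int) := Int.natCast_nonneg _
    omega
  have hcnt1 : ∀ d, ((pvWin cs last (m + 1)).count d : Int)
      = ((pvWin cs last m).count d : Int) + (if cs[m] = d then 1 else 0) := by
    intro d
    rw [pvCount_push cs hLm hm d]
    by_cases hd : cs[m] = d <;> simp [hd]
  -- the new MaxLetRepeat dominates the counts of the extended window
  have hdom' : ∀ d, ((pvWin cs last (m + 1)).count d : Int)
      ≤ max st.2.1 (st.2.2.1.getD cs[m] 0 + 1) := by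
    intro d
    by_cases hdc : cs[m] = d
    · subst hdc
      rw [← hfval]
      exact le_max_right _ _
    · rw [hcnt1 d, if_neg hdc]
      have := hdom d
      have h2 := le_max_left st.2.1 (st.2.2.1.getD cs[m] 0 + 1)
      omega
  -- the new MaxLetRepeat is achieved by a window of size ≤ (m - last) + 1 starting ≤ last
  have hM2' : ∃ p t c', p ≤ last ∧ t < m + 1 ∧ t + 1 - p ≤ (m - last) + 1 ∧
      ((pvWin cs p (t + 1)).count c' : Int) = max st.2.1 (st.2.2.1.getD cs[m] 0 + 1) := by
    rcases max_cases st.2.1 (st.2.2.1.getD cs[m] 0 + 1) with ⟨hmx, hge⟩ | ⟨hmx, hlt⟩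
    · rcases hM2 with hz | ⟨p, t, c', hp, ht, hb, hcnt⟩
      · exfalso; omega
      · exact ⟨p, t, c', hp, by omega, hb, by rw [hmx, hcnt]⟩
    · refine ⟨last, m, cs[m], le_refl _, by omega, by omega, ?_⟩
      rw [hmx, hfval]
  have hM'pos : (1 : Int) ≤ max st.2.1 (st.2.2.1.getD cs[m] 0 + 1) :=
    le_trans hfpos (le_max_right _ _)
  by_cases hcond : (m : Int) - (last : Int) + 1 - max st.2.1 (st.2.2.1.getD cs[m] 0 + 1) > k
  · -- shrink: lastIndex advances by one
    have hlm2 : last < cs.length := by omega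
    obtain ⟨e1, e2, e3, e4⟩ := pvStepA_shrink cs k st m last hm hlm2 hL hcond
    have hwc : pvWin cs last (m + 1) = cs[last] :: pvWin cs (last + 1) (m + 1) :=
      pvWin_cons cs hLm hlm2
    have c1 : (pvStepA cs k st (m : Int)).2.2.2 = ((last + 1 : Nat) : Int) := by
      rw [e4]; push_cast; ring
    have c2 : last + 1 ≤ m + 1 := by omega
    have c3 : (pvStepA cs k st (m : Int)).1 = (((m + 1) - (last + 1) : Nat) : Int) := by
      rw [e1, hmax]
      have h5 : (m : Int) - ((last : Int) + 1) + 1 = ((m - last : Nat) : Int) := by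
        rw [Nat.cast_sub hLm]; ring
      rw [h5, max_self]
      congr 1
      omega
    have c4 : ∀ d, (pvStepA cs k st (m : Int)).2.2.1.getD d 0
        = ((pvWin cs (last + 1) (m + 1)).count d : Int) := by
      intro d
      rw [e3 d, hF d]
      have hc2 : ((pvWin cs last (m + 1)).count d : Int)
          = (if cs[last] = d then 1 else 0) + ((pvWin cs (last + 1) (m + 1)).count d : Int) := by
        rw [hwc, List.count_cons]
        by_cases hd : cs[last] = d <;> simp [hd] <;> try omega
      have hc1 := hcnt1 d
      omega
    have c5 : ∀ d, ((pvWin cs (last + 1) (m + 1)).count d : Int)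
        ≤ (pvStepA cs k st (m : Int)).2.1 := by
      intro d
      rw [e2]
      have hcle : (pvWin cs (last + 1) (m + 1)).count d ≤ (pvWin cs last (m + 1)).count d := by
        rw [hwc, List.count_cons]
        omega
      have hcle' : ((pvWin cs (last + 1) (m + 1)).count d : Int)
          ≤ ((pvWin cs last (m + 1)).count d : Int) := by exact_mod_cast hcle
      exact le_trans hcle' (hdom' d)
    have c6 : (pvStepA cs k st (m : Int)).2.1 = 0 ∨ ∃ p t c, p ≤ last + 1 ∧ t < m + 1 ∧
        t + 1 - p ≤ ((m + 1) - (last + 1)) + 1 ∧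
        ((pvWin cs p (t + 1)).count c : Int) = (pvStepA cs k st (m : Int)).2.1 := by
      right
      rw [e2]
      obtain ⟨p, t, c', hp, ht, hb, hcnt⟩ := hM2'
      have hp' : p ≤ last + 1 := by omega
      have hb' : t + 1 - p ≤ (m + 1 - (last + 1)) + 1 := by omega
      exact ⟨p, t, c', hp', ht, hb', hcnt⟩
    have c7 : m + 1 = last + 1 ∨ ∃ p c, p + ((m + 1) - (last + 1)) ≤ m + 1 ∧
        (((m + 1) - (last + 1) : Nat) : Int)
          - ((pvWin cs p (p + ((m + 1) - (last + 1)))).count c : Int) ≤ k := by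
      rcases hW with hnl | ⟨p, c', hple, hfe⟩
      · left; omega
      · right
        have hsz : m + 1 - (last + 1) = m - last := Nat.succ_sub_succ m last
        rw [hsz]
        have hple' : p + (m - last) ≤ m + 1 := le_trans hple (Nat.le_succ m)
        exact ⟨p, c', hple', hfe⟩
    exact ⟨last + 1, c1, c2, c3, c4, c5, c6, c7⟩
  · -- no shrink: the window grows by one
    obtain ⟨e1, e2, e3, e4⟩ := pvStepA_grow cs k st m last hm hL hcond
    have c2 : last ≤ m + 1 := Nat.le_succ_of_le hLm
    have c3 : (pvStepA cs k st (m : Int)).1 = (((m + 1) - last : Nat) : Int) := by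
      rw [e1, hmax]
      have h5 : ((m - last : Nat) : Int) ≤ (m : Int) - (last : Int) + 1 := by
        rw [Nat.cast_sub hLm]; exact le_of_lt (lt_add_one _)
      rw [max_eq_right h5, Nat.cast_sub c2]
      push_cast; ring
    have c4 : ∀ d, (pvStepA cs k st (m : Int)).2.2.1.getD d 0
        = ((pvWin cs last (m + 1)).count d : Int) := by
      intro d
      rw [e3 d, hF d]
      have hc1 := hcnt1 d
      omega
    have c5 : ∀ d, ((pvWin cs last (m + 1)).count d : Int) ≤ (pvStepA cs k st (m : Int)).2.1 := by
      intro d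
      rw [e2]
      exact hdom' d
    have c6 : (pvStepA cs k st (m : Int)).2.1 = 0 ∨ ∃ p t c, p ≤ last ∧ t < m + 1 ∧
        t + 1 - p ≤ ((m + 1) - last) + 1 ∧
        ((pvWin cs p (t + 1)).count c : Int) = (pvStepA cs k st (m : Int)).2.1 := by
      right
      rw [e2]
      obtain ⟨p, t, c', hp, ht, hb, hcnt⟩ := hM2'
      have hb' : t + 1 - p ≤ (m + 1 - last) + 1 := by omega
      exact ⟨p, t, c', hp, ht, hb', hcnt⟩
    have c7 : m + 1 = last ∨ ∃ p c, p + ((m + 1) - last) ≤ m + 1 ∧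
        (((m + 1) - last : Nat) : Int)
          - ((pvWin cs p (p + ((m + 1) - last))).count c : Int) ≤ k := by
      right
      obtain ⟨p, t, c', hp, ht, hb, hcnt⟩ := hM2'
      have htp : t + 1 ≤ p + (m + 1 - last) := by
        have h9 : m + 1 - last = m - last + 1 := Nat.succ_sub hLm
        calc t + 1 ≤ (m - last + 1) + p := Nat.le_add_of_sub_le hb
          _ = p + (m + 1 - last) := by rw [h9, Nat.add_comm]
      have hmono : ((pvWin cs p (t + 1)).count c' : Int)
          ≤ ((pvWin cs p (p + (m + 1 - last))).count c' : Int) := by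
        exact_mod_cast pvWin_count_mono cs c' htp
      have hple : p + (m + 1 - last) ≤ m + 1 :=
        le_trans (Nat.add_le_add_right hp _) (le_of_eq (Nat.add_sub_cancel' c2))
      refine ⟨p, c', hple, ?_⟩
      have hcast : ((m + 1 - last : Nat) : Int) = (m : Int) - (last : Int) + 1 := by
        rw [Nat.succ_sub hLm]
        push_cast [Nat.cast_sub hLm]
        ring
      rw [hcast]
      have h1 := sub_le_sub_left hmono ((m : Int) - (last : Int) + 1)
      rw [hcnt] at h1
      exact le_trans h1 (not_lt.mp hcond)
    exact ⟨last, e4, c2, c3, c4, c5, c6, c7⟩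

lemma pvInv_all (cs : List Char) (k : Int) : ∀ m, m ≤ cs.length → pvInv cs k m (pvFoldA cs k m) := by
  intro m
  induction m with
  | zero =>
    intro _
    rw [pvFoldA_zero]
    refine ⟨0, rfl, le_refl _, rfl, ?_, ?_, Or.inl rfl, Or.inl rfl⟩
    · intro d; simp [pvWin_self, PySem.Dict.getD_empty]
    · intro d; simp [pvWin_self]
  | succ m ih =>
    intro hm
    rw [pvFoldA_succ]
    exact pvInv_step cs k m _ (by omega) (ih (by omega))

-- maxLength never decreases along A's loop
lemma pvStepA_fst_le (cs : List Char) (k : Int) (st : Int × Int × PySem.Dict Char Int × Int) (i : Int) :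
    st.1 ≤ (pvStepA cs k st i).1 := by
  simp only [pvStepA]
  exact le_max_left _ _

lemma pvFoldA_fst_mono (cs : List Char) (k : Int) (m m' : Nat) (h : m ≤ m') :
    (pvFoldA cs k m).1 ≤ (pvFoldA cs k m').1 := by
  induction m' with
  | zero =>
    have h0 : m = 0 := by omega
    subst h0; exact le_refl _
  | succ m' ih =>
    by_cases he : m = m' + 1
    · subst he; exact le_refl _
    · rw [pvFoldA_succ]
      exact le_trans (ih (by omega)) (pvStepA_fst_le cs k _ _)

-- while a window [i, j+1) needing at most k replacements is being read,
-- lastIndex never moves past i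
lemma pvStays (cs : List Char) (k : Int) (i j : Nat) (hij : i ≤ j) (hj : j < cs.length) (c₀ : Char)
    (hfeas : ((j + 1 - i : Nat) : Int) - ((pvWin cs i (j + 1)).count c₀ : Int) ≤ k) :
    ∀ d : Nat, i + d ≤ j + 1 →
      ∃ last : Nat, (pvFoldA cs k (i + d)).2.2.2 = (last : Int) ∧ last ≤ i := by
  intro d
  induction d with
  | zero =>
    intro _
    obtain ⟨last, hL, hLm, _⟩ := pvInv_all cs k i (by omega)
    exact ⟨last, hL, hLm⟩
  | succ d ih =>
    intro hle
    obtain ⟨last, hL, hlast⟩ := ih (by omega)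
    have hmn : i + d < cs.length := by omega
    obtain ⟨last₂, hL₂, hLm, hmax, hF, hdom, hM2, hW⟩ := pvInv_all cs k (i + d) (by omega)
    have hll : last₂ = last := by
      have h8 : ((last₂ : Nat) : Int) = ((last : Nat) : Int) := hL₂.symm.trans hL
      exact_mod_cast h8
    subst hll
    have hstep : i + (d + 1) = (i + d) + 1 := by omega
    rw [hstep, pvFoldA_succ]
    by_cases hcond : ((i + d : Nat) : Int) - (last₂ : Int) + 1
        - max (pvFoldA cs k (i + d)).2.1 ((pvFoldA cs k (i + d)).2.2.1.getD cs[i + d] 0 + 1) > k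
    · -- a shrink: harmless unless lastIndex was exactly i, which is impossible
      have hlm2 : last₂ < cs.length := by omega
      obtain ⟨e1, e2, e3, e4⟩ := pvStepA_shrink cs k (pvFoldA cs k (i + d)) (i + d) last₂ hmn hlm2 hL₂ hcond
      by_cases hli : last₂ < i
      · have c1 : (pvStepA cs k (pvFoldA cs k (i + d)) ((i + d : Nat) : Int)).2.2.2
            = ((last₂ + 1 : Nat) : Int) := by
          rw [e4]; push_cast; ring
        have c2 : last₂ + 1 ≤ i := by omega
        exact ⟨last₂ + 1, c1, c2⟩
      · exfalso
        have hlieq : last₂ = i := by omega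
        -- the new MaxLetRepeat dominates the count of c₀ in [last₂, (i+d)+1)
        have hfval : (pvFoldA cs k (i + d)).2.2.1.getD cs[i + d] 0 + 1
            = ((pvWin cs last₂ ((i + d) + 1)).count cs[i + d] : Int) := by
          rw [hF cs[i + d], pvCount_push cs hLm hmn cs[i + d], if_pos rfl]
          push_cast; ring
        have hMge : ((pvWin cs last₂ ((i + d) + 1)).count c₀ : Int)
            ≤ max (pvFoldA cs k (i + d)).2.1 ((pvFoldA cs k (i + d)).2.2.1.getD cs[i + d] 0 + 1) := by
          by_cases hdc : cs[i + d] = c₀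
          · rw [← hdc, ← hfval]
            exact le_max_right _ _
          · have heq : (pvWin cs last₂ ((i + d) + 1)).count c₀ = (pvWin cs last₂ (i + d)).count c₀ := by
              rw [pvCount_push cs hLm hmn c₀, if_neg hdc]
              omega
            rw [heq]
            exact le_trans (hdom c₀) (le_max_left _ _)
        -- split the count of c₀ over [i, j+1) at (i+d)+1
        have hword1 : last₂ ≤ (i + d) + 1 := by omega
        have hword2 : (i + d) + 1 ≤ j + 1 := by omega
        have hsplit : (pvWin cs last₂ (j + 1)).count c₀
            = (pvWin cs last₂ ((i + d) + 1)).count c₀ + (pvWin cs ((i + d) + 1) (j + 1)).count c₀ := by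
          rw [pvWin_append cs last₂ ((i + d) + 1) (j + 1) hword1 hword2, List.count_append]
        have htail : (pvWin cs ((i + d) + 1) (j + 1)).count c₀ ≤ j - (i + d) := by
          refine le_trans List.count_le_length ?_
          rw [pvWin_length]
          omega
        have h2 : ((j + 1 - last₂ : Nat) : Int) = (j : Int) + 1 - (last₂ : Int) := by push_cast; omega
        rw [hlieq] at hMge hsplit hfval
        rw [hlieq] at hcond
        clear ih hW hM2 hF hdom e1 e2 e3 e4 hL hL₂ hfval hmax
        omega
    · obtain ⟨e1, e2, e3, e4⟩ := pvStepA_grow cs k (pvFoldA cs k (i + d)) (i + d) last₂ hmn hL₂ hcond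
      exact ⟨last₂, e4, hlast⟩

-- ===== generic fold lemmas for B =====

lemma pvFoldl_ge_init {α : Type} (g : Int → α → Int) (hmono : ∀ b x, b ≤ g b x) :
    ∀ (l : List α) (b : Int), b ≤ l.foldl g b := by
  intro l
  induction l with
  | nil => intro b; simp
  | cons y t ih => intro b; exact le_trans (hmono b y) (ih _)

lemma pvFoldl_ge_elem {α : Type} (g : Int → α → Int) (hmono : ∀ b x, b ≤ g b x) (v : Int) (x : α)
    (hv : ∀ b, v ≤ g b x) : ∀ (l : List α), x ∈ l → ∀ b, v ≤ l.foldl g b := by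
  intro l
  induction l with
  | nil => intro hx; exact absurd hx (List.not_mem_nil)
  | cons y t ih =>
    intro hx b
    rcases List.mem_cons.1 hx with h | h
    · subst h
      exact le_trans (hv b) (pvFoldl_ge_init g hmono t _)
    · exact ih h _

lemma pvFoldl_le {α : Type} (g : Int → α → Int) (bd : Int) :
    ∀ (l : List α), (∀ b x, b ≤ bd → x ∈ l → g b x ≤ bd) → ∀ b, b ≤ bd → l.foldl g b ≤ bd := by
  intro l
  induction l with
  | nil => intro _ b hb; simpa using hb
  | cons y t ih =>
    intro hstep b hb
    exact ih (fun b x hbx hx => hstep b x hbx (List.mem_cons_of_mem y hx)) (g b y)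
      (hstep b y hb (List.mem_cons_self ..))

-- ===== facts about pvMaxCount =====

lemma pvMaxCount_nonneg (sub : List Char) : 0 ≤ pvMaxCount sub := by
  unfold pvMaxCount
  cases h : PySem.List.max? ((PySem.Set.ofList sub).map (fun c => (sub.count c : Int))) (fun x => x) with
  | none => simp
  | some m =>
    have hmem := PySem.List.max?_mem h
    obtain ⟨c, _, hval⟩ := List.mem_map.1 hmem
    simp only [Option.getD_some]
    rw [← hval]
    exact Int.natCast_nonneg _

lemma pvMaxCount_ge_count (sub : List Char) (c : Char) :
    (sub.count c : Int) ≤ pvMaxCount sub := by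
  by_cases hc : c ∈ sub
  · unfold pvMaxCount
    cases h : PySem.List.max? ((PySem.Set.ofList sub).map (fun d => (sub.count d : Int))) (fun x => x) with
    | none =>
      rw [PySem.List.max?_eq_none_iff] at h
      have hmem : c ∈ PySem.Set.ofList sub := (PySem.Set.mem_ofList sub c).2 hc
      rw [List.map_eq_nil_iff] at h
      rw [h] at hmem
      exact absurd hmem (List.not_mem_nil)
    | some m =>
      have := PySem.List.max?_isMax h ((sub.count c : Int))
        (List.mem_map.2 ⟨c, (PySem.Set.mem_ofList sub c).2 hc, rfl⟩)
      simpa using this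
  · have h0 : sub.count c = 0 := List.count_eq_zero.2 hc
    rw [h0]
    exact_mod_cast pvMaxCount_nonneg sub

lemma pvMaxCount_attained (sub : List Char) (hne : sub ≠ []) :
    ∃ c ∈ sub, pvMaxCount sub = (sub.count c : Int) := by
  unfold pvMaxCount
  cases h : PySem.List.max? ((PySem.Set.ofList sub).map (fun d => (sub.count d : Int))) (fun x => x) with
  | none =>
    rw [PySem.List.max?_eq_none_iff, List.map_eq_nil_iff] at h
    exfalso
    obtain ⟨x, hx⟩ := List.exists_mem_of_ne_nil sub hne
    have hmem : x ∈ PySem.Set.ofList sub := (PySem.Set.mem_ofList sub x).2 hx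
    rw [h] at hmem
    exact absurd hmem (List.not_mem_nil)
  | some m =>
    obtain ⟨c, hcmem, hval⟩ := List.mem_map.1 (PySem.List.max?_mem h)
    exact ⟨c, (PySem.Set.mem_ofList sub c).1 hcmem, by simp [← hval]⟩

-- B restated as a nested fold over integer index ranges
lemma pvB_eq (str : String) (k : Int) :
    LongestStrWithSameLettersAfterReplacement_alt str k
    = (PySem.List.pyRange 0 (str.toList.length : Int) 1).foldl (fun best i =>
        (PySem.List.pyRange i (str.toList.length : Int) 1).foldl (fun best j =>
          if (j + 1 - i) - pvMaxCount (PySem.List.slice str.toList (some i) (some (j + 1))) ≤ k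
          then max best (j + 1 - i) else best) best) 0 := rfl

lemma pvB_nonneg (str : String) (k : Int) : 0 ≤ LongestStrWithSameLettersAfterReplacement_alt str k := by
  rw [pvB_eq]
  apply pvFoldl_ge_init
  intro b i
  apply pvFoldl_ge_init
  intro b' j
  split_ifs
  · exact le_max_left _ _
  · exact le_refl _

lemma pvB_ge (str : String) (k : Int) (i j : Int) (h0i : 0 ≤ i) (hij : i ≤ j)
    (hj : j < (str.toList.length : Int))
    (hcond : (j + 1 - i) - pvMaxCount (PySem.List.slice str.toList (some i) (some (j + 1))) ≤ k) :
    j + 1 - i ≤ LongestStrWithSameLettersAfterReplacement_alt str k := by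
  rw [pvB_eq]
  have hmono : ∀ (b : Int) (x : Int),
      b ≤ (PySem.List.pyRange x (str.toList.length : Int) 1).foldl (fun best j =>
        if (j + 1 - x) - pvMaxCount (PySem.List.slice str.toList (some x) (some (j + 1))) ≤ k
        then max best (j + 1 - x) else best) b := by
    intro b x
    apply pvFoldl_ge_init
    intro b' y
    split_ifs
    · exact le_max_left _ _
    · exact le_refl _
  apply pvFoldl_ge_elem _ (fun b x => hmono b x) (j + 1 - i) i ?inner _
    (PySem.List.mem_pyRange_one.2 ⟨h0i, by omega⟩) 0
  case inner =>
    intro b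
    apply pvFoldl_ge_elem _ ?m2 (j + 1 - i) j ?v2 _ (PySem.List.mem_pyRange_one.2 ⟨hij, hj⟩) b
    case m2 =>
      intro b' y
      split_ifs
      · exact le_max_left _ _
      · exact le_refl _
    case v2 =>
      intro b'
      rw [if_pos hcond]
      exact le_max_right _ _

lemma pvB_le (str : String) (k : Int) (bd : Int) (h0 : 0 ≤ bd)
    (hall : ∀ i j : Int, 0 ≤ i → i ≤ j → j < (str.toList.length : Int) →
      (j + 1 - i) - pvMaxCount (PySem.List.slice str.toList (some i) (some (j + 1))) ≤ k →
      j + 1 - i ≤ bd) :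
    LongestStrWithSameLettersAfterReplacement_alt str k ≤ bd := by
  rw [pvB_eq]
  apply pvFoldl_le _ bd _ ?steps 0 h0
  case steps =>
    intro b i hb hi
    obtain ⟨h0i, hin⟩ := PySem.List.mem_pyRange_one.1 hi
    apply pvFoldl_le _ bd _ ?inner b hb
    case inner =>
      intro b' j hb' hj
      obtain ⟨hij, hjn⟩ := PySem.List.mem_pyRange_one.1 hj
      split_ifs with hcond
      · exact max_le hb' (hall i j h0i hij hjn hcond)
      · exact hb'

-- ===== VERDICT (by name: the statement is the Claim_ definition above) =====
theorem LongestStrWithSameLettersAfterReplacement_spec : Claim_equal_LongestStrWithSameLettersAfterReplacement := by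
  intro str k _
  unfold Spec_LongestStrWithSameLettersAfterReplacement
  obtain ⟨last, hL, hlast, hmax, _, _, _, hW⟩ :=
    pvInv_all str.toList k str.toList.length (le_refl _)
  have hA : LongestStrWithSameLettersAfterReplacement str k
      = ((str.toList.length - last : Nat) : Int) := by
    rw [pvA_eq]; exact hmax
  apply le_antisymm
  · -- A ≤ B: a window of the final size needs at most k replacements
    rw [hA]
    rcases hW with hnl | ⟨p, c, hple, hfe⟩
    · have h0 : str.toList.length - last = 0 := by omega
      rw [h0]
      simpa using pvB_nonneg str k
    · by_cases hsz0 : str.toList.length - last = 0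
      · rw [hsz0]
        simpa using pvB_nonneg str k
      · have hsub : PySem.List.slice str.toList (some (p : Int))
            (some ((p : Int) + ((str.toList.length - last : Nat) : Int) - 1 + 1))
            = pvWin str.toList p (p + (str.toList.length - last)) := by
          have he : (p : Int) + ((str.toList.length - last : Nat) : Int) - 1 + 1
              = ((p + (str.toList.length - last) : Nat) : Int) := by push_cast; ring
          rw [he, PySem.List.slice_natCast]
          rfl
        have hcnd : (((p : Int) + ((str.toList.length - last : Nat) : Int) - 1) + 1 - (p : Int))
            - pvMaxCount (PySem.List.slice str.toList (some (p : Int))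
              (some (((p : Int) + ((str.toList.length - last : Nat) : Int) - 1) + 1))) ≤ k := by
          rw [hsub]
          have h1 := pvMaxCount_ge_count (pvWin str.toList p (p + (str.toList.length - last))) c
          omega
        have hge := pvB_ge str k (p : Int)
          ((p : Int) + ((str.toList.length - last : Nat) : Int) - 1)
          (Int.natCast_nonneg _) (by omega) (by push_cast; omega) hcnd
        omega
  · -- B ≤ A: every window needing at most k replacements is at most the final size
    apply pvB_le str k _ (by rw [hA]; exact Int.natCast_nonneg _)
    intro i j h0i hij hjn hcond
    have hii : i = (i.toNat : Int) := by omega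
    have hjj : j = (j.toNat : Int) := by omega
    have hi'j' : i.toNat ≤ j.toNat := by omega
    have hj'n : j.toNat < str.toList.length := by omega
    have hsub : PySem.List.slice str.toList (some i) (some (j + 1))
        = pvWin str.toList i.toNat (j.toNat + 1) := by
      have he : j + 1 = ((j.toNat + 1 : Nat) : Int) := by omega
      rw [hii, he, PySem.List.slice_natCast]
      rfl
    have hne : pvWin str.toList i.toNat (j.toNat + 1) ≠ [] := by
      have hpos : 0 < (pvWin str.toList i.toNat (j.toNat + 1)).length := by
        rw [pvWin_length]
        omega
      intro hnil
      rw [hnil] at hpos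
      simp at hpos
    obtain ⟨c₀, _, hceq⟩ := pvMaxCount_attained _ hne
    rw [hsub, hceq] at hcond
    have hfeas : ((j.toNat + 1 - i.toNat : Nat) : Int)
        - ((pvWin str.toList i.toNat (j.toNat + 1)).count c₀ : Int) ≤ k := by
      have he : ((j.toNat + 1 - i.toNat : Nat) : Int) = j + 1 - i := by omega
      rw [he]
      exact hcond
    obtain ⟨last₁, hL₁, hlast₁⟩ := pvStays str.toList k i.toNat j.toNat hi'j' hj'n c₀ hfeas
      (j.toNat + 1 - i.toNat) (by omega)
    have heq : i.toNat + (j.toNat + 1 - i.toNat) = j.toNat + 1 := by omega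
    rw [heq] at hL₁
    obtain ⟨last₂, hL₂, hLm₂, hmax₂, _, _, _, _⟩ := pvInv_all str.toList k (j.toNat + 1) (by omega)
    have hll : last₂ = last₁ := by
      have h8 : ((last₂ : Nat) : Int) = ((last₁ : Nat) : Int) := hL₂.symm.trans hL₁
      exact_mod_cast h8
    subst hll
    have hmono := pvFoldA_fst_mono str.toList k (j.toNat + 1) str.toList.length (by omega)
    rw [hmax₂] at hmono
    rw [pvA_eq]
    have hle2 : j + 1 - i ≤ ((j.toNat + 1 - last₂ : Nat) : Int) := by push_cast; omega
    omega
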